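-- pv_equiv track=rewrite | github.com/Baiyu6666/learning_equality_constraints | analyze/old_benchmark_boxplots.py | _infer_dataset_order
-- ===== SOURCE A (Python) =====
-- def _infer_dataset_order(rows: list[dict[str, object]], methods: list[str]) -> list[str]:
--     known = [
--         "2d_ellipse",
--         "2d_looped_spiro",
--         "2d_planar_arm_line_n2",
--         "2d_sparse_sine",
--         "3d_planar_arm_line_n3",
--         "3d_planar_arm_line_n3_traj",
--         "3d_spatial_arm_ellip_n3",
--         "3d_spatial_arm_ellip_n3_traj",
--         "3d_twosphere",
--         "3d_twosphere_traj",
--         "3d_torus_surface",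
--         "3d_torus_surface_traj",
--         "3d_vz_2d_ellipse",
--         "3d_vz_2d_ellipse_traj",
--         "6d_spatial_arm_up_n6_py",
--         "6d_spatial_arm_up_n6_py_traj",
--         "6d_workspace_sine_surface_pose",
--         "6d_workspace_sine_surface_pose_traj",
--     ]
--     seen = sorted({str(r["dataset"]) for r in rows if str(r.get("dataset", ""))})
--     out: list[str] = [d for d in known if d in seen]
--     out.extend([d for d in seen if d not in out])
--     return out
-- ===== SOURCE B (Python) =====
-- def _infer_dataset_order(rows: list[dict[str, object]], methods: list[str]) -> list[str]:
--     known = [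
--         "2d_ellipse",
--         "2d_looped_spiro",
--         "2d_planar_arm_line_n2",
--         "2d_sparse_sine",
--         "3d_planar_arm_line_n3",
--         "3d_planar_arm_line_n3_traj",
--         "3d_spatial_arm_ellip_n3",
--         "3d_spatial_arm_ellip_n3_traj",
--         "3d_twosphere",
--         "3d_twosphere_traj",
--         "3d_torus_surface",
--         "3d_torus_surface_traj",
--         "3d_vz_2d_ellipse",
--         "3d_vz_2d_ellipse_traj",
--         "6d_spatial_arm_up_n6_py",
--         "6d_spatial_arm_up_n6_py_traj",
--         "6d_workspace_sine_surface_pose",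
--         "6d_workspace_sine_surface_pose_traj",
--     ]
--     seen = sorted({str(r["dataset"]) for r in rows if str(r.get("dataset", ""))})
--     rank = {name: i for i, name in enumerate(known)}
--     return sorted(seen, key=lambda d: (rank.get(d, len(known)), d))
-- ===== Notes on version B (the rewrite author's own statement) =====
-- stated objective: alternative
-- what changed: Replaces A's two-pass partition (filter known by membership, then append the sorted leftovers) with a single rank-keyed sort: a rank table over the canonical list and one sorted() call with key (rank.get(d, len(known)), d).
import Mathlib
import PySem

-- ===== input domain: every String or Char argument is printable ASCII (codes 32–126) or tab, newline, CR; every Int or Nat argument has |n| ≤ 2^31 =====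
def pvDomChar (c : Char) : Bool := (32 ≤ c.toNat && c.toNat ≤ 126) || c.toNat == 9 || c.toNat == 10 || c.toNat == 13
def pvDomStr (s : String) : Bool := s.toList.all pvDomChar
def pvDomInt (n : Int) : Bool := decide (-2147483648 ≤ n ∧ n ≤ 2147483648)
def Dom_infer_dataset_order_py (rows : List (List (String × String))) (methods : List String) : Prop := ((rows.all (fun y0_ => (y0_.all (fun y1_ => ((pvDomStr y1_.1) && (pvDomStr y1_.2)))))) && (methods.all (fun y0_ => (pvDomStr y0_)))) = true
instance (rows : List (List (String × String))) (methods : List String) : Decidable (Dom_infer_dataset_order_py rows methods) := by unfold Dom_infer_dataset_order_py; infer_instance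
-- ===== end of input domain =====

-- B replaces A's two-pass "filter known by membership, then append the leftover sorted names"
-- with a single rank-keyed sort over the same deduplicated name list (objective: alternative).

-- ===== PORT A =====
def pvKnown : List String := [
  "2d_ellipse",
  "2d_looped_spiro",
  "2d_planar_arm_line_n2",
  "2d_sparse_sine",
  "3d_planar_arm_line_n3",
  "3d_planar_arm_line_n3_traj",
  "3d_spatial_arm_ellip_n3",
  "3d_spatial_arm_ellip_n3_traj",
  "3d_twosphere",
  "3d_twosphere_traj",
  "3d_torus_surface",
  "3d_torus_surface_traj",
  "3d_vz_2d_ellipse",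
  "3d_vz_2d_ellipse_traj",
  "6d_spatial_arm_up_n6_py",
  "6d_spatial_arm_up_n6_py_traj",
  "6d_workspace_sine_surface_pose",
  "6d_workspace_sine_surface_pose_traj"]

-- seen = sorted({str(r["dataset"]) for r in rows if str(r.get("dataset", ""))});
-- under the guard the value is nonempty, so r["dataset"] (which cannot raise there) = r.get("dataset","") exactly.
def pvSeen (rows : List (List (String × String))) : List String :=
  PySem.List.sorted
    (PySem.Set.ofList
      ((rows.filter (fun r => decide (PySem.Dict.getD (PySem.Dict.mk r) "dataset" "" ≠ ""))).map
        (fun r => PySem.Dict.getD (PySem.Dict.mk r) "dataset" "")))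
    (fun x => x) false

def infer_dataset_order_py (rows : List (List (String × String))) (methods : List String) : List String :=
  let known := pvKnown
  let seen := pvSeen rows
  let out := known.filter (fun d => decide (d ∈ seen))
  out ++ (seen.filter (fun d => decide (d ∉ out)))

-- ===== PORT B =====
def infer_dataset_order_py_alt (rows : List (List (String × String))) (methods : List String) : List String :=
  let known := pvKnown
  let seen := pvSeen rows
  let rank : PySem.Dict String Int :=
    PySem.Dict.ofList ((PySem.List.enumerate known).map (fun p => (p.2, p.1)))
  PySem.List.sorted2 seen (fun d => PySem.Dict.getD rank d ((known.length : Int))) (fun d => d) false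

-- ===== PRECONDITION & SPEC =====
def Spec_infer_dataset_order_py (rows : List (List (String × String))) (methods : List String) (out : List String) : Prop := out = infer_dataset_order_py_alt rows methods
instance (rows : List (List (String × String))) (methods : List String) (out : List String) : Decidable (Spec_infer_dataset_order_py rows methods out) := by unfold Spec_infer_dataset_order_py; infer_instance

-- ===== CLAIM (what is proved, stated in full; the proofs are below) =====
def Claim_equal_infer_dataset_order_py : Prop := ∀ (rows : List (List (String × String))) (methods : List String), Dom_infer_dataset_order_py rows methods → Spec_infer_dataset_order_py rows methods (infer_dataset_order_py rows methods)

-- ===== LEMMAS AND PROOFS =====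

def pvRank : PySem.Dict String Int :=
  PySem.Dict.ofList ((PySem.List.enumerate pvKnown).map (fun p => (p.2, p.1)))

-- sorted2's lexicographic comparator is exactly the strict order of the Lex product key
theorem pv_sorted2_eq_sorted_toLex {α κ₁ κ₂ : Type} [LinearOrder κ₁] [LinearOrder κ₂]
    (xs : List α) (k1 : α → κ₁) (k2 : α → κ₂) :
    PySem.List.sorted2 xs k1 k2 false =
      PySem.List.sorted xs (fun x => toLex (k1 x, k2 x)) false := by
  have hcmp : (fun (a b : α) => decide (k1 a < k1 b) || (!decide (k1 b < k1 a) && decide (k2 a < k2 b)))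
      = (fun a b => decide (toLex (k1 a, k2 a) < toLex (k1 b, k2 b))) := by
    funext a b
    by_cases h1 : k1 a < k1 b
    · simp [Prod.Lex.toLex_lt_toLex, h1]
    · by_cases h2 : k1 b < k1 a
      · simp [Prod.Lex.toLex_lt_toLex, h1, h2, (ne_of_lt h2).symm]
      · have he : k1 a = k1 b := le_antisymm (not_lt.mp h2) (not_lt.mp h1)
        simp [Prod.Lex.toLex_lt_toLex, he]
  rw [PySem.List.sorted_eq_foldl_insertBy]
  simp [PySem.List.sorted2, hcmp]

theorem pv_rank_lt (d : String) (h : d ∈ pvKnown) : PySem.Dict.getD pvRank d 18 < 18 := by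
  fin_cases h <;> decide

theorem pv_rank_default (d : String) (h : d ∉ pvKnown) : PySem.Dict.getD pvRank d 18 = 18 := by
  have hk : (pvRank.keys : List String) = pvKnown := by decide
  have : pvRank.get? d = none := by
    rw [PySem.Dict.get?_eq_none_iff_not_mem_keys, hk]; exact h
  simp [PySem.Dict.getD, this]

theorem pv_main (S : List String) (hnd : S.Nodup) (hS : S.Pairwise (· < ·)) :
    pvKnown.filter (fun d => decide (d ∈ S)) ++
      S.filter (fun d => decide (d ∉ pvKnown.filter (fun g => decide (g ∈ S))))
    = PySem.List.sorted2 S (fun d => PySem.Dict.getD pvRank d ((pvKnown.length : Int))) (fun d => d) false := by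
  have hlen : ((pvKnown.length : Int)) = 18 := by decide
  rw [pv_sorted2_eq_sorted_toLex, hlen]
  set key : String → Lex (Int × String) := fun d => toLex (PySem.Dict.getD pvRank d 18, d) with hkey
  set F1 := pvKnown.filter (fun d => decide (d ∈ S)) with hF1
  have hmemF1 : ∀ d, d ∈ F1 ↔ d ∈ pvKnown ∧ d ∈ S := by
    intro d; simp [hF1, List.mem_filter]
  have hfilter_eq : S.filter (fun d => decide (d ∉ F1)) = S.filter (fun d => !decide (d ∈ pvKnown)) := by
    apply List.filter_congr
    intro d hd
    simp [hmemF1, hd]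
  rw [hfilter_eq]
  set F2 := S.filter (fun d => !decide (d ∈ pvKnown)) with hF2
  symm
  apply PySem.List.sorted_eq_of_perm_of_pairwise_lt
  · -- (F1 ++ F2).Perm S
    have hknd : pvKnown.Nodup := by decide
    have h1 : F1.Perm (S.filter (fun d => decide (d ∈ pvKnown))) := by
      rw [List.perm_ext_iff_of_nodup (hF1 ▸ hknd.filter _) (hnd.filter _)]
      intro a
      simp [hF1, List.mem_filter, and_comm]
    have h2 : ((S.filter (fun d => decide (d ∈ pvKnown))) ++ F2).Perm S := by
      rw [hF2]; exact List.filter_append_perm _ S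
    exact (h1.append_right F2).trans h2
  · -- strictly increasing in key
    rw [List.pairwise_append]
    refine ⟨?_, ?_, ?_⟩
    · -- within F1: ranks strictly increase along pvKnown
      have hp : pvKnown.Pairwise (fun a b => PySem.Dict.getD pvRank a 18 < PySem.Dict.getD pvRank b 18) := by
        decide
      exact (hp.filter _).imp (fun h => by
        simp only [hkey, Prod.Lex.toLex_lt_toLex]; exact Or.inl h)
    · -- within F2: ranks both default, names strictly increase
      have hp : F2.Pairwise (fun a b : String => a < b) := hS.filter _
      apply List.Pairwise.imp_of_mem ?_ hp
      intro a b ha hb hab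
      have hna : a ∉ pvKnown := by
        have := List.of_mem_filter ha; simpa using this
      have hnb : b ∉ pvKnown := by
        have := List.of_mem_filter hb; simpa using this
      simp only [hkey, Prod.Lex.toLex_lt_toLex, pv_rank_default _ hna, pv_rank_default _ hnb]
      exact Or.inr ⟨by simp, hab⟩
    · -- across: every known r).rank < 18 = every unknown rank
      intro a ha b hb
      have hma : a ∈ pvKnown := (hmemF1 a |>.mp ha).1
      have hnb : b ∉ pvKnown := by
        have := List.of_mem_filter hb; simpa using this
      simp only [hkey, Prod.Lex.toLex_lt_toLex, pv_rank_default _ hnb]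
      exact Or.inl (pv_rank_lt a hma)

theorem pvSeen_nodup (rows : List (List (String × String))) : (pvSeen rows).Nodup := by
  unfold pvSeen
  have h := PySem.List.sorted_perm (PySem.Set.ofList
      ((rows.filter (fun r => decide (PySem.Dict.getD (PySem.Dict.mk r) "dataset" "" ≠ ""))).map
        (fun r => PySem.Dict.getD (PySem.Dict.mk r) "dataset" ""))) (fun x : String => x) false
  exact h.symm.nodup (PySem.Set.nodup_ofList _)

theorem pvSeen_sorted (rows : List (List (String × String))) : (pvSeen rows).Pairwise (· < ·) := by
  unfold pvSeen
  exact PySem.List.sorted_ofList_pairwise_lt _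

-- ===== VERDICT (by name: the statement is the Claim_ definition above) =====
theorem infer_dataset_order_py_spec : Claim_equal_infer_dataset_order_py := by
  intro rows methods _
  unfold Spec_infer_dataset_order_py infer_dataset_order_py infer_dataset_order_py_alt
  simp only []
  exact pv_main (pvSeen rows) (pvSeen_nodup rows) (pvSeen_sorted rows)
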